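-- pv_equiv track=rewrite | github.com/uzumal/cisco-cybervision-to-kenna-cvm-Integration | src/export_vuln_csv.py | extract_os_info
-- ===== SOURCE A (Python) =====
-- def extract_os_info(props):
--     os_name = "None"
--     os_version = "None"
--
--     if not props:
--         return os_name, os_version
--
--     for p in props:
--         if p.get("key") == "os-name":
--             os_name = p.get("value", "None")
--             break
--
--     for p in props:
--         if p.get("key") == "os-version":
--             os_version = p.get("value", "None")
--             break
--
--     return os_name, os_version
-- ===== SOURCE B (Python) =====
-- def extract_os_info(props):
--     name = None
--     version = None
--     for p in props:
--         k = p.get("key")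
--         if name is None and k == "os-name":
--             name = p.get("value", "None")
--         if version is None and k == "os-version":
--             version = p.get("value", "None")
--         if name is not None and version is not None:
--             break
--     return (name if name is not None else "None",
--             version if version is not None else "None")
-- ===== Notes on version B (the rewrite author's own statement) =====
-- stated objective: alternative
-- what changed: Replaces A's two separate break-on-first-match scans with a single early-terminating pass carrying two Option accumulators (first occurrence wins, loop stops once both keys are found).
import Mathlib
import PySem

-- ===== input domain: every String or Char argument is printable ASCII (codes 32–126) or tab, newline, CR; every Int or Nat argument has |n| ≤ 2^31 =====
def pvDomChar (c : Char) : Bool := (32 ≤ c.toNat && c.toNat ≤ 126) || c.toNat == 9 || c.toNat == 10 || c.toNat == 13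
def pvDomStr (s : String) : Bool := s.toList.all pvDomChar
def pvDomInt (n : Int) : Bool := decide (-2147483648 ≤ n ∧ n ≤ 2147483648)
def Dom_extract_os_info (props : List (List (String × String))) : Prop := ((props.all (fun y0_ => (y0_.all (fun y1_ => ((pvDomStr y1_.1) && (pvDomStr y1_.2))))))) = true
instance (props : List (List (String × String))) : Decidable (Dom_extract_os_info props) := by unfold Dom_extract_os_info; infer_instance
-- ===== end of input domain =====

-- B replaces A's two break-on-first-match scans by one early-terminating pass carrying two Option accumulators; alternative structure, same cost.

-- ===== PORT A =====
-- 'for p in props: if p.get("key") == target: result = p.get("value","None"); break' with initial value cur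
def pvFindA (props : List (List (String × String))) (target : String) (cur : String) : String :=
  match props with
  | [] => cur
  | p :: rest =>
      if (PySem.Dict.mk p).get? "key" == some target then
        ((PySem.Dict.mk p).get? "value").getD "None"
      else pvFindA rest target cur

def extract_os_info (props : List (List (String × String))) : String × String :=
  if props = [] then ("None", "None")
  else (pvFindA props "os-name" "None", pvFindA props "os-version" "None")

-- ===== PORT B =====
-- the single loop of Source B: name/version start as None, are set on first match, loop breaks when both are set
def pvScanB (props : List (List (String × String))) (name version : Option String) : String × String :=
  match props with
  | [] => (name.getD "None", version.getD "None")
  | p :: rest =>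
      let k := (PySem.Dict.mk p).get? "key"
      let name' := if name.isNone && (k == some "os-name") then
          some (((PySem.Dict.mk p).get? "value").getD "None") else name
      let version' := if version.isNone && (k == some "os-version") then
          some (((PySem.Dict.mk p).get? "value").getD "None") else version
      if name'.isSome && version'.isSome then (name'.getD "None", version'.getD "None")
      else pvScanB rest name' version'

def extract_os_info_alt (props : List (List (String × String))) : String × String :=
  pvScanB props none none

-- ===== PRECONDITION & SPEC =====
def Spec_extract_os_info (props : List (List (String × String))) (out : String × String) : Prop := out = extract_os_info_alt props
instance (props : List (List (String × String))) (out : String × String) : Decidable (Spec_extract_os_info props out) := by unfold Spec_extract_os_info; infer_instance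

-- ===== CLAIM (what is proved, stated in full; the proofs are below) =====
def Claim_equal_extract_os_info : Prop := ∀ (props : List (List (String × String))), Dom_extract_os_info props → Spec_extract_os_info props (extract_os_info props)

-- ===== LEMMAS AND PROOFS =====

-- first value recorded for key t while scanning props, as an Option
def pvOptFind (props : List (List (String × String))) (t : String) : Option String :=
  match props with
  | [] => none
  | p :: rest =>
      if (PySem.Dict.mk p).get? "key" == some t then
        some (((PySem.Dict.mk p).get? "value").getD "None")
      else pvOptFind rest t

theorem pvFindA_eq_optFind (props : List (List (String × String))) (t cur : String) :
    pvFindA props t cur = (pvOptFind props t).getD cur := by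
  induction props with
  | nil => rfl
  | cons p rest ih =>
      simp only [pvFindA, pvOptFind]
      split_ifs <;> simp [ih]

theorem pvScanB_eq (props : List (List (String × String))) (name version : Option String) :
    pvScanB props name version =
      ((name.or (pvOptFind props "os-name")).getD "None",
       (version.or (pvOptFind props "os-version")).getD "None") := by
  induction props generalizing name version with
  | nil => simp [pvScanB, pvOptFind]
  | cons p rest ih =>
      simp only [pvScanB, pvOptFind]
      rcases name with _ | n <;> rcases version with _ | v <;>
        by_cases h1 : ((PySem.Dict.mk p).get? "key" == some "os-name") = true <;>
        by_cases h2 : ((PySem.Dict.mk p).get? "key" == some "os-version") = true <;>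
          simp_all [Option.or]

-- ===== VERDICT (by name: the statement is the Claim_ definition above) =====
theorem extract_os_info_spec : Claim_equal_extract_os_info := by
  intro props _
  unfold Spec_extract_os_info extract_os_info extract_os_info_alt
  split_ifs with h
  · subst h; rfl
  · simp [pvFindA_eq_optFind, pvScanB_eq]
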